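-- pv_equiv track=rewrite | github.com/JanLMoffett/PlayByPlayMiner | PlayByPlayMiner1/Old Files/scrape8.py | newline_filter
-- ===== SOURCE A (Python) =====
-- def newline_filter(string_list):
--
--
--     no_nl = []
--     for i,s in enumerate(string_list):
--         ts = ""
--         for j in range(0, len(s)):
--
--             if s[j] == '\\':
--                 ts += ' '
--             elif j>0 and s[j-1] == '\\':
--                 continue
--             else:
--                 ts += s[j]
--         no_nl.append(ts)
--
--     #build return_list
--     return no_nl
-- ===== SOURCE B (Python) =====
-- def newline_filter(string_list):
--     # split each string on backslashes; each separator becomes a space and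
--     # the first char of the following segment (the char after the backslash,
--     # never itself a backslash) is dropped
--     out = []
--     for s in string_list:
--         segs = s.split('\\')
--         out.append(segs[0] + ''.join(' ' + seg[1:] for seg in segs[1:]))
--     return out
-- ===== Notes on version B (the rewrite author's own statement) =====
-- stated objective: idiomatic
-- what changed: B replaces the per-character index loop with prev-character lookback by str.split on backslash plus a join that emits a space per separator and drops each following segment's first character.
import Mathlib
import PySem

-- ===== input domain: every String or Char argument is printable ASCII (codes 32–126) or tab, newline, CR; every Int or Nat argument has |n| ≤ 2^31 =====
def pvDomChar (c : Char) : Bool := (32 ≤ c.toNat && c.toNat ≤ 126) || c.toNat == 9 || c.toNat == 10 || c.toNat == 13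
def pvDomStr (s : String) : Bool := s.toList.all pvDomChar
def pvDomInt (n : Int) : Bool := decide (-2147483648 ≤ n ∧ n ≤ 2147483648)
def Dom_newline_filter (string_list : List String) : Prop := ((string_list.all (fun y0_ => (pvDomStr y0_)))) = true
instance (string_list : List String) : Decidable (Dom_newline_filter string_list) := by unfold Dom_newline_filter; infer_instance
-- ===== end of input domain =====

-- B replaces A's indexed character loop (with lookback at the previous char) by split-on-backslash
-- plus a join; proved to return the same list on every input (idiomatic rewrite, same cost).

-- ===== PORT A =====
-- inner loop: for j in range(0, len(s)); j is always in range, so s[j] is List.getD (exact here)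
def newline_filter (string_list : List String) : List String :=
  (PySem.List.enumerate string_list).foldl (fun no_nl is =>
    let cs := is.2.toList
    let ts := (List.range cs.length).foldl (fun ts j =>
      if cs.getD j ' ' = '\\' then ts ++ [' ']
      else if 0 < j ∧ cs.getD (j - 1) ' ' = '\\' then ts
      else ts ++ [cs.getD j ' ']) ([] : List Char)
    no_nl ++ [String.ofList ts]) []

-- ===== PORT B =====
-- s.split('\\') with a one-char separator is exactly List.splitOn '\\' on the code points
def newline_filter_alt (string_list : List String) : List String :=
  string_list.map (fun s =>
    let segs := s.toList.splitOn '\\'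
    String.ofList (segs.headD [] ++ (segs.drop 1).flatMap (fun seg => ' ' :: seg.drop 1)))

-- ===== PRECONDITION & SPEC =====
def Spec_newline_filter (string_list : List String) (out : List String) : Prop := out = newline_filter_alt string_list
instance (string_list : List String) (out : List String) : Decidable (Spec_newline_filter string_list out) := by unfold Spec_newline_filter; infer_instance

-- ===== CLAIM (what is proved, stated in full; the proofs are below) =====
def Claim_equal_newline_filter : Prop := ∀ (string_list : List String), Dom_newline_filter string_list → Spec_newline_filter string_list (newline_filter string_list)

-- ===== LEMMAS AND PROOFS =====

-- one left-to-right scan with a flag "previous char was a backslash": the common normal form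
def pvScan (b : Bool) : List Char → List Char
  | [] => []
  | c :: r => if c = '\\' then ' ' :: pvScan true r else if b then pvScan false r else c :: pvScan false r

def pvH1 (segs : List (List Char)) : List Char :=
  segs.headD [] ++ (segs.drop 1).flatMap (fun seg => ' ' :: seg.drop 1)

def pvH2 (segs : List (List Char)) : List Char :=
  (segs.headD []).drop 1 ++ (segs.drop 1).flatMap (fun seg => ' ' :: seg.drop 1)

def pvLast (b : Bool) (xs : List Char) : Bool :=
  match xs.getLast? with
  | some d => d == '\\'
  | none => b

lemma pvLast_cons (b : Bool) (x : Char) (xs : List Char) :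
    pvLast b (x :: xs) = pvLast (x == '\\') xs := by
  cases xs with
  | nil => simp [pvLast]
  | cons y ys =>
    simp only [pvLast, List.getLast?_cons_cons]
    cases h : (y :: ys).getLast? with
    | none => simp at h
    | some d => rfl

lemma pvScan_snoc (xs : List Char) : ∀ (b : Bool) (c : Char),
    pvScan b (xs ++ [c]) = pvScan b xs ++
      (if c = '\\' then [' '] else if pvLast b xs then [] else [c]) := by
  induction xs with
  | nil => intro b c; by_cases hc : c = '\\' <;> cases b <;> simp [pvScan, pvLast, hc]
  | cons x xs ih =>
    intro b c
    by_cases hx : x = '\\'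
    · simp [pvScan, hx, ih true c, pvLast_cons]
    · have hxb : (x == '\\') = false := by simp [hx]
      cases b <;> simp [pvScan, hx, ih false c, pvLast_cons, hxb]

-- B-side: split/join equals the scan (mutual with the "just after a backslash" state)
lemma pvSplit_spec : ∀ cs : List Char,
    pvH1 (cs.splitOn '\\') = pvScan false cs ∧ pvH2 (cs.splitOn '\\') = pvScan true cs := by
  intro cs
  induction cs with
  | nil => simp [List.splitOn_nil, pvH1, pvH2, pvScan]
  | cons x u ih =>
    obtain ⟨ih1, ih2⟩ := ih
    by_cases hx : x = '\\'
    · have hsplit : (x :: u).splitOn '\\' = [] :: u.splitOn '\\' := by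
        simp [List.splitOn, List.splitOnP_cons, hx]
      obtain ⟨h, t, ht⟩ := List.exists_cons_of_ne_nil (List.splitOnP_ne_nil _ u)
      constructor
      · rw [hsplit]
        simp only [pvH1, List.headD, List.drop_succ_cons, List.drop_zero]
        rw [show u.splitOn '\\' = h :: t from ht] at ih2 ⊢
        simp only [pvH2, List.headD, List.drop_succ_cons, List.drop_zero] at ih2
        simp [pvScan, hx, ← ih2]
      · rw [hsplit]
        simp only [pvH2, List.headD, List.drop_succ_cons, List.drop_zero, List.drop_nil]
        rw [show u.splitOn '\\' = h :: t from ht] at ih2 ⊢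
        simp only [pvH2, List.headD, List.drop_succ_cons, List.drop_zero] at ih2
        simp [pvScan, hx, ← ih2]
    · obtain ⟨h, t, ht⟩ := List.exists_cons_of_ne_nil (List.splitOnP_ne_nil _ u)
      have hsplit : (x :: u).splitOn '\\' = (x :: h) :: t := by
        simp [List.splitOn, List.splitOnP_cons, hx]
        rw [show u.splitOnP (· == '\\') = h :: t from ht]
        rfl
      rw [show u.splitOn '\\' = h :: t from ht] at ih1 ih2
      constructor
      · rw [hsplit]
        simp only [pvH1, List.headD, List.drop_succ_cons, List.drop_zero] at ih1 ⊢
        simp [pvScan, hx, ← ih1]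
      · rw [hsplit]
        simp only [pvH1, pvH2, List.headD, List.drop_succ_cons, List.drop_zero] at ih1 ⊢
        simp [pvScan, hx, ← ih1]

-- A-side: the indexed foldl over range equals the scan on the prefix
lemma pvFold_spec (cs : List Char) : ∀ n : Nat, n ≤ cs.length →
    (List.range n).foldl (fun ts j =>
      if cs.getD j ' ' = '\\' then ts ++ [' ']
      else if 0 < j ∧ cs.getD (j - 1) ' ' = '\\' then ts
      else ts ++ [cs.getD j ' ']) ([] : List Char) = pvScan false (cs.take n) := by
  intro n
  induction n with
  | zero => intro _; simp [pvScan]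
  | succ n ih =>
    intro hn
    have hlt : n < cs.length := hn
    have htake : cs.take (n + 1) = cs.take n ++ [cs[n]] := by
      rw [List.take_add_one, List.getElem?_eq_getElem hlt]; rfl
    have hgetn : cs.getD n ' ' = cs[n] := by
      rw [List.getD_eq_getElem?_getD, List.getElem?_eq_getElem hlt]; rfl
    rw [List.range_succ, List.foldl_append, ih (le_of_lt hlt), htake,
        pvScan_snoc (cs.take n) false cs[n]]
    simp only [List.foldl_cons, List.foldl_nil, hgetn]
    by_cases hbs : cs[n] = '\\'
    · simp [hbs]
    · simp only [if_neg hbs]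
      cases n with
      | zero => simp [pvLast]
      | succ m =>
        have hm : m < cs.length := lt_trans (Nat.lt_succ_self m) hlt
        have htm : cs.take (m + 1) = cs.take m ++ [cs[m]] := by
          rw [List.take_add_one, List.getElem?_eq_getElem hm]; rfl
        have hgm : cs.getD (m + 1 - 1) ' ' = cs[m] := by
          rw [Nat.add_sub_cancel, List.getD_eq_getElem?_getD, List.getElem?_eq_getElem hm]; rfl
        have hlast : pvLast false (cs.take (m + 1)) = (cs[m] == '\\') := by
          rw [htm]
          simp only [pvLast, List.getLast?_concat]
        rw [hgm, hlast]
        by_cases hb2 : cs[m] = '\\' <;> simp [hb2]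

-- A's outer loop over enumerate appends one result per string
lemma pvEnum_fold (g : String → String) : ∀ (l : List String) (s0 : Int) (acc : List String),
    (PySem.List.enumerate l s0).foldl (fun no_nl is => no_nl ++ [g is.2]) acc = acc ++ l.map g := by
  intro l
  induction l with
  | nil => intro s0 acc; simp [PySem.List.enumerate_nil]
  | cons x xs ih => intro s0 acc; simp [PySem.List.enumerate_cons, ih]

-- ===== VERDICT (by name: the statement is the Claim_ definition above) =====
theorem newline_filter_spec : Claim_equal_newline_filter := by
  intro l _
  show newline_filter l = newline_filter_alt l
  have hA : newline_filter l = l.map (fun s => String.ofList (pvScan false s.toList)) := by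
    unfold newline_filter
    have hfun : (fun (no_nl : List String) (is : Int × String) =>
        let cs := is.2.toList
        let ts := (List.range cs.length).foldl (fun ts j =>
          if cs.getD j ' ' = '\\' then ts ++ [' ']
          else if 0 < j ∧ cs.getD (j - 1) ' ' = '\\' then ts
          else ts ++ [cs.getD j ' ']) ([] : List Char)
        no_nl ++ [String.ofList ts]) =
        (fun no_nl is => no_nl ++ [String.ofList (pvScan false is.2.toList)]) := by
      funext no_nl is
      simp only
      rw [pvFold_spec is.2.toList is.2.toList.length le_rfl, List.take_length]
    rw [hfun, pvEnum_fold (fun s => String.ofList (pvScan false s.toList)) l 0 []]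
    simp
  rw [hA]
  unfold newline_filter_alt
  apply List.map_congr_left
  intro s _
  have h1 := (pvSplit_spec s.toList).1
  simp only [pvH1] at h1
  simp only [← h1]
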